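-- pv_equiv track=rewrite | github.com/wangyendt/LeetCode | Contests/week 192/1471. The k Strongest Values in an Array/The k Strongest Values in an Array.py | getStrongest
-- ===== SOURCE A (Python) =====
-- def getStrongest(arr: list, k: int) -> list:
--     n = len(arr)
--     arr.sort()
--     median_ind = (n - 1) // 2
--     mid = arr[median_ind]
--     ret = []
--
--     def cmp(a1, a2, m):
--         if abs(a1 - m) > abs(a2 - m):
--             return True
--         elif abs(a1 - m) == abs(a2 - m) and a1 > a2:
--             return True
--         return False
--
--     for _ in range(k):
--         if cmp(arr[0], arr[-1], mid):
--             ret.append(arr.pop(0))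
--         else:
--             ret.append(arr.pop())
--     return ret
-- ===== SOURCE B (Python) =====
-- def getStrongest(arr: list, k: int) -> list:
--     s = sorted(arr)
--     n = len(s)
--     m = s[(n - 1) // 2]
--     ret = []
--     i, j = 0, n - 1
--     for _ in range(k):
--         if abs(s[i] - m) > abs(s[j] - m) or (abs(s[i] - m) == abs(s[j] - m) and s[i] > s[j]):
--             ret.append(s[i])
--             i += 1
--         else:
--             ret.append(s[j])
--             j -= 1
--     return ret
-- ===== Notes on version B (the rewrite author's own statement) =====
-- stated objective: faster
-- what changed: B sorts a copy once and walks two index pointers inward from both ends, appending the stronger end each step, instead of A's repeated arr.pop(0)/arr.pop() which shifts the whole list on every front pop; B also does not mutate the input (A sorts and empties arr in place).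
import Mathlib
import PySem

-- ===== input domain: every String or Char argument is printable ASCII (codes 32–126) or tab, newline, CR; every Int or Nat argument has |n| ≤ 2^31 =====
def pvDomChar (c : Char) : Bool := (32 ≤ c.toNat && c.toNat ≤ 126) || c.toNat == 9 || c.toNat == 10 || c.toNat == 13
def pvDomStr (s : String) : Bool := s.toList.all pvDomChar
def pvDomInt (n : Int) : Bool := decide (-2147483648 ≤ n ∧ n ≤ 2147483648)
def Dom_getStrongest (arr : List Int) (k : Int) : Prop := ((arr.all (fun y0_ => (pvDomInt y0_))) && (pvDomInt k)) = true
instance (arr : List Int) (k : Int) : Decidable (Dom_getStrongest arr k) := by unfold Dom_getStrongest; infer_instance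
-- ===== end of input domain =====

-- B replaces A's repeated arr.pop(0)/arr.pop() (each front pop shifts the list) by two index
-- pointers walking inward over the sorted list: O(n log n + k) instead of O(n log n + k*n).
-- Equivalence is about the RETURN value only: Python A sorts and pops `arr` in place; B does not mutate it.

-- ===== PORT A =====
def pvCmpA (a1 a2 m : Int) : Bool :=
  if (a1 - m).natAbs > (a2 - m).natAbs then true
  else if (a1 - m).natAbs = (a2 - m).natAbs ∧ a1 > a2 then true
  else false

-- one iteration of A's loop: inspect arr[0] / arr[-1], pop the stronger end, append it to ret
def pvStepA (mid : Int) (st : List Int × List Int) : List Int × List Int :=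
  if pvCmpA (PySem.List.pyGetD st.1 0 0) (PySem.List.pyGetD st.1 (-1) 0) mid then
    match PySem.List.pop? st.1 0 with
    | some (v, rest) => (rest, st.2 ++ [v])
    | none => (st.1, st.2)
  else
    match PySem.List.pop? st.1 (-1) with
    | some (v, rest) => (rest, st.2 ++ [v])
    | none => (st.1, st.2)

def getStrongest (arr : List Int) (k : Int) : List Int :=
  let n : Int := PySem.List.len arr
  let a := PySem.List.sorted arr id
  let medianInd := PySem.Int.floordiv (n - 1) 2
  let mid := PySem.List.pyGetD a medianInd 0
  ((PySem.List.pyRange 0 k 1).foldl (fun st _ => pvStepA mid st) (a, [])).2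

-- ===== PORT B =====
def pvStronger (x y m : Int) : Bool :=
  (x - m).natAbs > (y - m).natAbs || ((x - m).natAbs = (y - m).natAbs && x > y)

-- B's `for _ in range(k)` loop over pointers i (from the left) and j (from the right)
def pvLoopB (s : List Int) (m : Int) : Nat → Int → Int → List Int → List Int
  | 0, _, _, ret => ret
  | t + 1, i, j, ret =>
    let x := PySem.List.pyGetD s i 0
    let y := PySem.List.pyGetD s j 0
    if pvStronger x y m then pvLoopB s m t (i + 1) j (ret ++ [x])
    else pvLoopB s m t i (j - 1) (ret ++ [y])

def getStrongest_alt (arr : List Int) (k : Int) : List Int :=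
  let s := PySem.List.sorted arr id
  let n : Int := PySem.List.len s
  let m := PySem.List.pyGetD s (PySem.Int.floordiv (n - 1) 2) 0
  pvLoopB s m k.toNat 0 (n - 1) []

-- ===== PRECONDITION & SPEC =====
-- Pre_ excludes exactly the inputs where Python A raises IndexError: the empty list (arr[median]
-- fails) and k > len(arr) (A pops from an emptied list).
def Pre_getStrongest (arr : List Int) (k : Int) : Prop := arr ≠ [] ∧ k ≤ (arr.length : Int)
instance (arr : List Int) (k : Int) : Decidable (Pre_getStrongest arr k) := by unfold Pre_getStrongest; infer_instance
def pvWitness_getStrongest : List Int × Int := ([1, 2, 3, 4, 5], 2)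

def Spec_getStrongest (arr : List Int) (k : Int) (out : List Int) : Prop := out = getStrongest_alt arr k
instance (arr : List Int) (k : Int) (out : List Int) : Decidable (Spec_getStrongest arr k out) := by unfold Spec_getStrongest; infer_instance

-- ===== CLAIM (what is proved, stated in full; the proofs are below) =====
def Claim_equal_getStrongest : Prop := ∀ (arr : List Int) (k : Int), Dom_getStrongest arr k → Pre_getStrongest arr k → Spec_getStrongest arr k (getStrongest arr k)

-- ===== LEMMAS AND PROOFS =====

-- both comparisons are the same Bool
lemma pvCmp_eq (a1 a2 m : Int) : pvCmpA a1 a2 m = pvStronger a1 a2 m := by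
  unfold pvCmpA pvStronger
  split_ifs <;> simp_all

-- a fold that ignores the list elements is an iterate
lemma pvFoldl_const {α β : Type} (f : β → β) (l : List α) (init : β) :
    l.foldl (fun st _ => f st) init = f^[l.length] init := by
  induction l generalizing init <;> simp [Function.iterate_succ_apply, *]

-- the segment of s between pointers i and j (inclusive)
def pvSeg (s : List Int) (i j : Nat) : List Int := (s.drop i).take (j + 1 - i)

lemma pvSeg_cons (s : List Int) (i j : Nat) (hij : i ≤ j) (hj : j < s.length) :
    pvSeg s i j = s[i]'(by omega) :: (s.drop (i + 1)).take (j - i) := by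
  unfold pvSeg
  rw [List.drop_eq_getElem_cons (by omega)]
  have : j + 1 - i = (j - i) + 1 := by omega
  rw [this, List.take_succ_cons]

-- MAIN INVARIANT: t iterations of A's pop-ends loop on the segment [i..j] of s
-- produce the same ret as B's pointer loop.
lemma pvMain (s : List Int) (m : Int) :
    ∀ (t i j : Nat) (ret : List Int), i + t ≤ j + 1 → j < s.length →
      ((pvStepA m)^[t] (pvSeg s i j, ret)).2 = pvLoopB s m t (i : Int) (j : Int) ret := by
  intro t
  induction t with
  | zero => intro i j ret _ _; simp [pvLoopB]
  | succ t ih =>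
    intro i j ret hle hj
    have hij : i ≤ j := by omega
    have hi : i < s.length := by omega
    have hgeti : PySem.List.pyGetD s (i : Int) 0 = s[i] := by
      rw [PySem.List.pyGetD_natCast]; exact List.getD_eq_getElem s 0 hi
    have hgetj : PySem.List.pyGetD s (j : Int) 0 = s[j] := by
      rw [PySem.List.pyGetD_natCast]; exact List.getD_eq_getElem s 0 hj
    have hsegc : pvSeg s i j = s[i] :: (s.drop (i + 1)).take (j - i) := pvSeg_cons s i j hij hj
    have hsega : pvSeg s i j = (s.drop i).take (j - i) ++ [s[j]] := by
      unfold pvSeg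
      have h1 : j + 1 - i = (j - i) + 1 := by omega
      rw [h1, List.take_add_one]
      have h2 : (s.drop i)[j - i]? = some s[j] := by
        rw [List.getElem?_drop]
        have h3 : i + (j - i) = j := by omega
        rw [h3, List.getElem?_eq_getElem hj]
      simp [h2]
    have hA0 : PySem.List.pyGetD (pvSeg s i j) 0 0 = s[i] := by
      rw [hsegc, PySem.List.pyGetD_zero_cons]
    have hA1 : PySem.List.pyGetD (pvSeg s i j) (-1) 0 = s[j] := by
      rw [hsega, PySem.List.pyGetD_neg_one_append_singleton]
    rw [Function.iterate_succ_apply]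
    simp only [pvLoopB, hgeti, hgetj]
    cases hb : pvStronger s[i] s[j] m with
    | true =>
      have hstep : pvStepA m (pvSeg s i j, ret)
          = (pvSeg s (i + 1) j, ret ++ [s[i]]) := by
        simp only [pvStepA, hA0, hA1, pvCmp_eq, hb, if_true]
        rw [hsegc, PySem.List.pop?_zero_cons]
        have : pvSeg s (i + 1) j = (s.drop (i + 1)).take (j - i) := by
          unfold pvSeg; congr 1; omega
        rw [this]
      rw [hstep, if_pos rfl,
        show ((i : Int) + 1) = ((i + 1 : Nat) : Int) by push_cast; ring]
      exact ih (i + 1) j (ret ++ [s[i]]) (by omega) hj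
    | false =>
      have hstep : pvStepA m (pvSeg s i j, ret)
          = ((s.drop i).take (j - i), ret ++ [s[j]]) := by
        simp only [pvStepA, hA0, hA1, pvCmp_eq, hb, if_false, Bool.false_eq_true]
        rw [hsega, PySem.List.pop?_last]
      rw [hstep, if_neg (by simp)]
      rcases Nat.eq_zero_or_pos t with ht | ht
      · subst ht; simp [pvLoopB]
      · have hj1 : 1 ≤ j := by omega
        have hseg' : (s.drop i).take (j - i) = pvSeg s i (j - 1) := by
          unfold pvSeg; congr 1; omega
        rw [hseg',
          show ((j : Int) - 1) = ((j - 1 : Nat) : Int) by omega]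
        exact ih i (j - 1) (ret ++ [s[j]]) (by omega) (by omega)

theorem pv_equal (arr : List Int) (k : Int) (h : Pre_getStrongest arr k) :
    getStrongest arr k = getStrongest_alt arr k := by
  obtain ⟨hne, hk⟩ := h
  have hlen0 : 0 < arr.length := List.length_pos_of_ne_nil hne
  unfold getStrongest getStrongest_alt
  have hslen : (PySem.List.sorted arr id).length = arr.length := PySem.List.length_sorted arr id false
  simp only [PySem.List.len_eq, hslen, pvFoldl_const, PySem.List.length_pyRange_one]
  have hinit : (PySem.List.sorted arr id) = pvSeg (PySem.List.sorted arr id) 0 (arr.length - 1) := by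
    unfold pvSeg
    rw [List.drop_zero]
    have : arr.length - 1 + 1 - 0 = arr.length := by omega
    rw [this, ← hslen, List.take_length]
  have hk' : 0 + (k - 0).toNat ≤ (arr.length - 1) + 1 := by omega
  rw [hinit, pvMain (PySem.List.sorted arr id) _ (k - 0).toNat 0 (arr.length - 1) [] hk' (by omega)]
  have hc1 : ((0 : Nat) : Int) = (0 : Int) := by norm_num
  have hc2 : (((arr.length - 1 : Nat)) : Int) = (arr.length : Int) - 1 := by omega
  rw [hc1, hc2, ← hinit, sub_zero]

-- ===== VERDICT (by name: the statement is the Claim_ definition above) =====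
theorem getStrongest_spec : Claim_equal_getStrongest := by
  intro arr k _ hpre
  exact pv_equal arr k hpre
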